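-- pv_equiv track=rewrite | github.com/elementalcollision/GraphMemory-IDE | server/collaboration/conflict_resolution.py | _are_contents_contradictory
-- ===== SOURCE A (Python) =====
-- from typing import Dict, List, Optional, Any, Tuple, Union, Callable
--
-- def _are_contents_contradictory(contents: List[str]) -> bool:
--     """Check if contents are contradictory"""
--     # Simple heuristic - could be enhanced with NLP
--     opposites = [
--         ("yes", "no"), ("true", "false"), ("enable", "disable"),
--         ("add", "remove"), ("include", "exclude")
--     ]
--
--     content_lower = [c.lower() for c in contents]
--     for word1, word2 in opposites:
--         if any(word1 in c for c in content_lower) and any(word2 in c for c in content_lower):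
--             return True
--
--     return False
-- ===== SOURCE B (Python) =====
-- _KEYWORDS = ("yes", "no", "true", "false", "enable", "disable",
--              "add", "remove", "include", "exclude")
-- _PAIRS = [("yes", "no"), ("true", "false"), ("enable", "disable"),
--           ("add", "remove"), ("include", "exclude")]
--
-- def _are_contents_contradictory(contents):
--     """One pass builds the set of keywords present, then check the pairs."""
--     present = set()
--     for c in contents:
--         cl = c.lower()
--         for w in _KEYWORDS:
--             if w in cl:
--                 present.add(w)
--     for w1, w2 in _PAIRS:
--         if w1 in present and w2 in present:
--             return True
--     return False
-- ===== Notes on version B (the rewrite author's own statement) =====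
-- stated objective: alternative
-- what changed: B makes a single pass over the contents building a set of which keywords occur, then consults that set once per opposite pair, instead of rescanning the whole content list twice for every pair.
import Mathlib
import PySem

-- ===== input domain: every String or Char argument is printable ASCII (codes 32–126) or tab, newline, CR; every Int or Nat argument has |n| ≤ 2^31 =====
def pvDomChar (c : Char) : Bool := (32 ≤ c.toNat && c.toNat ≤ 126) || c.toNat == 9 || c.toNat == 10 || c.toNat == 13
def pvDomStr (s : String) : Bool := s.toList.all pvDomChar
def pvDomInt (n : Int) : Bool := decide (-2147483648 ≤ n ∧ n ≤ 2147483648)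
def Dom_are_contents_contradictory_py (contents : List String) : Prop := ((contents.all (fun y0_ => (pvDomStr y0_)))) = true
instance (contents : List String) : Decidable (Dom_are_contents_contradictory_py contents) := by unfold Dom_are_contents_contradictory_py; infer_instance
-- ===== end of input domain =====

-- B builds a set of the keywords that occur in one pass over the contents, then checks each opposite pair against that set (alternative decomposition; A rescans the content list for every pair).


-- ===== PORT A =====
def aOpposites : List (String × String) :=
  [("yes", "no"), ("true", "false"), ("enable", "disable"),
   ("add", "remove"), ("include", "exclude")]

-- the for-loop with early `return True` over the fixed pair list is List.any
def are_contents_contradictory_py (contents : List String) : Bool :=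
  let content_lower := contents.map PySem.Str.lower
  aOpposites.any (fun p =>
    (content_lower.any (fun c => PySem.Str.isIn p.1 c)) &&
    (content_lower.any (fun c => PySem.Str.isIn p.2 c)))

-- ===== PORT B =====
def bKeywords : List String :=
  ["yes", "no", "true", "false", "enable", "disable",
   "add", "remove", "include", "exclude"]

def bPairs : List (String × String) :=
  [("yes", "no"), ("true", "false"), ("enable", "disable"),
   ("add", "remove"), ("include", "exclude")]

def bPresent (contents : List String) : PySem.Set String :=
  contents.foldl
    (fun s c =>
      let cl := PySem.Str.lower c
      bKeywords.foldl (fun s w => if PySem.Str.isIn w cl then s.add w else s) s)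
    PySem.Set.empty

def are_contents_contradictory_py_alt (contents : List String) : Bool :=
  let present := bPresent contents
  bPairs.any (fun p => present.contains p.1 && present.contains p.2)

-- ===== PRECONDITION & SPEC =====
def Spec_are_contents_contradictory_py (contents : List String) (out : Bool) : Prop := out = are_contents_contradictory_py_alt contents
instance (contents : List String) (out : Bool) : Decidable (Spec_are_contents_contradictory_py contents out) := by unfold Spec_are_contents_contradictory_py; infer_instance

-- ===== CLAIM (what is proved, stated in full; the proofs are below) =====
def Claim_equal_are_contents_contradictory_py : Prop := ∀ (contents : List String), Dom_are_contents_contradictory_py contents → Spec_are_contents_contradictory_py contents (are_contents_contradictory_py contents)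

-- ===== LEMMAS AND PROOFS =====

-- membership after the inner keyword fold for one content string
theorem mem_inner_fold (ks : List String) (s : PySem.Set String) (cl w : String) :
    w ∈ ks.foldl (fun s w' => if PySem.Str.isIn w' cl then s.add w' else s) s ↔
      w ∈ s ∨ (w ∈ ks ∧ PySem.Str.isIn w cl = true) := by
  induction ks generalizing s with
  | nil => simp
  | cons k t ih =>
    simp only [List.foldl_cons, ih]
    by_cases hk : PySem.Str.isIn k cl = true
    · simp only [hk, if_pos]
      rw [PySem.Set.mem_add]
      constructor
      · rintro ((h | rfl) | ⟨ht, hw⟩)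
        · exact Or.inl h
        · exact Or.inr ⟨List.mem_cons_self .., hk⟩
        · exact Or.inr ⟨List.mem_cons_of_mem _ ht, hw⟩
      · rintro (h | ⟨hm, hw⟩)
        · exact Or.inl (Or.inl h)
        · rcases List.mem_cons.mp hm with rfl | ht
          · exact Or.inl (Or.inr rfl)
          · exact Or.inr ⟨ht, hw⟩
    · simp only [hk, if_neg, Bool.false_eq_true, not_false_iff]
      constructor
      · rintro (h | ⟨ht, hw⟩)
        · exact Or.inl h
        · exact Or.inr ⟨List.mem_cons_of_mem _ ht, hw⟩
      · rintro (h | ⟨hm, hw⟩)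
        · exact Or.inl h
        · rcases List.mem_cons.mp hm with rfl | ht
          · exact absurd hw hk
          · exact Or.inr ⟨ht, hw⟩

-- membership in the present-set fold, with a general accumulator
theorem mem_outer_fold (cs : List String) (s : PySem.Set String) (w : String) :
    w ∈ cs.foldl
        (fun s c =>
          let cl := PySem.Str.lower c
          bKeywords.foldl (fun s w' => if PySem.Str.isIn w' cl then s.add w' else s) s) s ↔
      w ∈ s ∨ (w ∈ bKeywords ∧ ∃ c ∈ cs, PySem.Str.isIn w (PySem.Str.lower c) = true) := by
  induction cs generalizing s with
  | nil => simp
  | cons c t ih =>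
    simp only [List.foldl_cons, ih, mem_inner_fold]
    constructor
    · rintro ((h | ⟨hk, hc⟩) | ⟨hk, c', hc', hw⟩)
      · exact Or.inl h
      · exact Or.inr ⟨hk, c, List.mem_cons_self .., hc⟩
      · exact Or.inr ⟨hk, c', List.mem_cons_of_mem _ hc', hw⟩
    · rintro (h | ⟨hk, c', hc', hw⟩)
      · exact Or.inl (Or.inl h)
      · rcases List.mem_cons.mp hc' with rfl | ht
        · exact Or.inl (Or.inr ⟨hk, hw⟩)
        · exact Or.inr ⟨hk, c', ht, hw⟩

theorem contains_bPresent (contents : List String) (w : String) (hw : w ∈ bKeywords) :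
    (bPresent contents).contains w =
      (contents.map PySem.Str.lower).any (fun c => PySem.Str.isIn w c) := by
  rcases h : (contents.map PySem.Str.lower).any (fun c => PySem.Str.isIn w c) with _ | _
  · simp only [List.any_eq_false, List.mem_map] at h
    apply Bool.eq_false_iff.mpr
    intro hc
    rw [PySem.Set.contains_iff, bPresent, mem_outer_fold] at hc
    rcases hc with hc | ⟨_, c, hcs, hin⟩
    · simp [PySem.Set.empty] at hc
    · exact absurd hin (by simpa using h (PySem.Str.lower c) ⟨c, hcs, rfl⟩)
  · simp only [List.any_eq_true, List.mem_map] at h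
    rcases h with ⟨cl, ⟨c, hcs, rfl⟩, hin⟩
    rw [PySem.Set.contains_iff, bPresent, mem_outer_fold]
    exact Or.inr ⟨hw, c, hcs, hin⟩

-- ===== VERDICT (by name: the statement is the Claim_ definition above) =====
theorem are_contents_contradictory_py_spec : Claim_equal_are_contents_contradictory_py := by
  intro contents _
  show are_contents_contradictory_py contents = are_contents_contradictory_py_alt contents
  unfold are_contents_contradictory_py are_contents_contradictory_py_alt
  have h := fun w hw => (contains_bPresent contents w hw).symm
  simp only [aOpposites, bPairs, List.any_cons, List.any_nil]
  rw [h "yes" (by decide), h "no" (by decide), h "true" (by decide),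
      h "false" (by decide), h "enable" (by decide), h "disable" (by decide),
      h "add" (by decide), h "remove" (by decide), h "include" (by decide),
      h "exclude" (by decide)]
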